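-- pv_equiv track=rewrite | github.com/DavidDING21/mouse_behavior_annotation | data_loader.py | find_consistent_segments
-- ===== SOURCE A (Python) =====
-- def find_consistent_segments(hljc, min_length=150, max_length=250):
--     """Find segments where hljc values remain consistent"""
--     segments = []
--     i = 0
--
--     while i < len(hljc):
--         current_cluster = hljc[i][0]
--         start = i
--
--         # Find consecutive frames with the same cluster value
--         while i < len(hljc) and hljc[i][0] == current_cluster:
--             i += 1
--
--         # Check segment length
--         segment_length = i - start
--         if segment_length >= min_length:
--             # If segment is too long, split into multiple segments
--             for j in range(start, i, max_length):
--                 end = min(j + max_length, i)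
--                 if end - j >= min_length:
--                     segments.append((j, end, current_cluster))
--
--     return segments
-- ===== SOURCE B (Python) =====
-- def find_consistent_segments(hljc, min_length=150, max_length=250):
--     """Two-phase rewrite: first materialize all maximal runs of equal
--     cluster as (start, end, cluster) triples, then chunk each long-enough
--     run into length-bounded segments."""
--     # phase 1: maximal runs
--     runs = []
--     for idx, item in enumerate(hljc):
--         c = item[0]
--         if runs and runs[-1][2] == c:
--             s = runs[-1][0]
--             runs[-1] = (s, idx + 1, c)
--         else:
--             runs.append((idx, idx + 1, c))
--     # phase 2: chunking
--     segments = []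
--     for s, e, c in runs:
--         segments += _chunks(s, e, c, min_length, max_length)
--     return segments
--
--
-- def _chunks(s, e, c, min_length, max_length):
--     if e - s < min_length:
--         return []
--     out = []
--     for j in range(s, e, max_length):
--         end = min(j + max_length, e)
--         if end - j >= min_length:
--             out.append((j, end, c))
--     return out
-- ===== Notes on version B (the rewrite author's own statement) =====
-- stated objective: alternative
-- what changed: Replaces A's single nested-while scan (detecting a run and chunking it in the same loop body) by two separate phases: one pass that materializes all maximal runs as (start, end, cluster) triples, then an independent pass that chunks each long-enough run.
import Mathlib
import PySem

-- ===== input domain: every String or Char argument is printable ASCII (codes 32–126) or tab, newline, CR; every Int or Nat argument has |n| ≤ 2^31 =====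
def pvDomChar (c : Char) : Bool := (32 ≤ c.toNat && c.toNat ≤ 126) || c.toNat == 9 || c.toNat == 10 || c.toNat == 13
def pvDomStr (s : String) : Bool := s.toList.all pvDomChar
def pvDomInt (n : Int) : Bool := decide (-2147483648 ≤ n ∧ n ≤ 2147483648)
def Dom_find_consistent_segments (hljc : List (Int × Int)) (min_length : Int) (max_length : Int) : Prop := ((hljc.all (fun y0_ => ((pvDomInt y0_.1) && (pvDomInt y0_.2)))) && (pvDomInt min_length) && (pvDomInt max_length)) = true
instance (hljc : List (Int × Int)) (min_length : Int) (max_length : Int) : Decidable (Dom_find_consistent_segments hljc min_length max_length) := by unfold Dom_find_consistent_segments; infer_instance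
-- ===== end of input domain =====

-- B restructures A's single nested-while scan into two separate phases (materialize
-- maximal runs, then chunk each run); objective: alternative decomposition, same cost.
-- ===== PORT A =====
-- inner while of A: advance i while hljc[i][0] == current_cluster
def runEndA (hljc : List (Int × Int)) (c : Int) (i : Nat) : Nat :=
  if h : i < hljc.length then
    if (hljc[i]'h).1 = c then runEndA hljc c (i + 1) else i
  else i
termination_by hljc.length - i

theorem le_runEndA (hljc : List (Int × Int)) (c : Int) (i : Nat) : i ≤ runEndA hljc c i := by
  fun_induction runEndA hljc c i with
  | case1 i h hc ih => omega
  | case2 i h hc => omega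
  | case3 i h => omega

theorem runEndA_gt (hljc : List (Int × Int)) (c : Int) (i : Nat) (h : i < hljc.length)
    (hc : (hljc[i]'h).1 = c) : i < runEndA hljc c i := by
  rw [runEndA]
  rw [dif_pos h, if_pos hc]
  have := le_runEndA hljc c (i + 1)
  omega

-- outer while of A, with the segment-emission for-loop inline
def loopA (hljc : List (Int × Int)) (minL maxL : Int) (i : Nat)
    (segs : List (Int × Int × Int)) : List (Int × Int × Int) :=
  if h : i < hljc.length then
    let c := (hljc[i]'h).1
    let e := runEndA hljc c i
    let segs' :=
      if minL ≤ (e : Int) - (i : Int) then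
        (PySem.List.pyRange (i : Int) (e : Int) maxL).foldl
          (fun acc j =>
            if minL ≤ min (j + maxL) (e : Int) - j then acc ++ [(j, min (j + maxL) (e : Int), c)]
            else acc) segs
      else segs
    loopA hljc minL maxL e segs'
  else segs
termination_by hljc.length - i
decreasing_by
  have := runEndA_gt hljc (hljc[i]'h).1 i h rfl
  omega

def find_consistent_segments (hljc : List (Int × Int)) (min_length : Int) (max_length : Int) : List (Int × Int × Int) :=
  loopA hljc min_length max_length 0 []

-- ===== PORT B =====
-- phase 1 step: merge index idx with the last run if the cluster repeats, else open a new run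
-- (runs are accumulated head-first; runsB reverses at the end)
def stepRun (acc : List (Int × Int × Int)) (p : Int × (Int × Int)) : List (Int × Int × Int) :=
  match acc with
  | (s, _, c') :: rest =>
      if c' = p.2.1 then (s, p.1 + 1, p.2.1) :: rest
      else (p.1, p.1 + 1, p.2.1) :: acc
  | [] => [(p.1, p.1 + 1, p.2.1)]

def runsB (hljc : List (Int × Int)) : List (Int × Int × Int) :=
  ((PySem.List.enumerate hljc 0).foldl stepRun []).reverse

-- phase 2: chunk one run
def chunksB (s e c minL maxL : Int) : List (Int × Int × Int) :=
  if e - s < minL then []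
  else
    (PySem.List.pyRange s e maxL).foldl
      (fun out j =>
        if minL ≤ min (j + maxL) e - j then out ++ [(j, min (j + maxL) e, c)] else out) []

def find_consistent_segments_alt (hljc : List (Int × Int)) (min_length : Int) (max_length : Int) : List (Int × Int × Int) :=
  (runsB hljc).foldl (fun segs r => segs ++ chunksB r.1 r.2.1 r.2.2 min_length max_length) []

-- ===== PRECONDITION & SPEC =====
-- longest block of equal adjacent values (used only to state Pre_)
def maxRunAux (l : List Int) (prev : Int) (cur best : Nat) : Nat :=
  match l with
  | [] => max cur best
  | c :: t => if c = prev then maxRunAux t prev (cur + 1) best else maxRunAux t c 1 (max cur best)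

def maxRun (l : List Int) : Nat :=
  match l with
  | [] => 0
  | c :: t => maxRunAux t c 1 0

-- Pre_ excludes exactly the inputs on which Python A raises: with max_length = 0,
-- range(start, i, 0) raises ValueError as soon as some maximal run reaches min_length.
def Pre_find_consistent_segments (hljc : List (Int × Int)) (min_length : Int) (max_length : Int) : Prop :=
  max_length ≠ 0 ∨ hljc = [] ∨ (maxRun (hljc.map Prod.fst) : Int) < min_length
instance (hljc : List (Int × Int)) (min_length : Int) (max_length : Int) : Decidable (Pre_find_consistent_segments hljc min_length max_length) := by unfold Pre_find_consistent_segments; infer_instance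

def pvWitness_find_consistent_segments : (List (Int × Int)) × Int × Int := ([(1, 0), (1, 0), (2, 0)], 1, 1)

def Spec_find_consistent_segments (hljc : List (Int × Int)) (min_length : Int) (max_length : Int) (out : List (Int × Int × Int)) : Prop := out = find_consistent_segments_alt hljc min_length max_length
instance (hljc : List (Int × Int)) (min_length : Int) (max_length : Int) (out : List (Int × Int × Int)) : Decidable (Spec_find_consistent_segments hljc min_length max_length out) := by unfold Spec_find_consistent_segments; infer_instance

-- ===== CLAIM (what is proved, stated in full; the proofs are below) =====
def Claim_equal_find_consistent_segments : Prop := ∀ (hljc : List (Int × Int)) (min_length : Int) (max_length : Int), Dom_find_consistent_segments hljc min_length max_length → Pre_find_consistent_segments hljc min_length max_length → Spec_find_consistent_segments hljc min_length max_length (find_consistent_segments hljc min_length max_length)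

-- ===== LEMMAS AND PROOFS =====

-- the run decomposition both programs compute, as a top-down recursion
def runsSpec (hljc : List (Int × Int)) (i : Nat) : List (Int × Int × Int) :=
  if h : i < hljc.length then
    ((i : Int), ((runEndA hljc (hljc[i]'h).1 i : Nat) : Int), (hljc[i]'h).1)
      :: runsSpec hljc (runEndA hljc (hljc[i]'h).1 i)
  else []
termination_by hljc.length - i
decreasing_by
  have := runEndA_gt hljc (hljc[i]'h).1 i h rfl
  omega

theorem runsSpec_pos (hljc : List (Int × Int)) (i : Nat) (h : i < hljc.length) :
    runsSpec hljc i
      = ((i : Int), ((runEndA hljc (hljc[i]'h).1 i : Nat) : Int), (hljc[i]'h).1)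
          :: runsSpec hljc (runEndA hljc (hljc[i]'h).1 i) := by
  rw [runsSpec]
  exact dif_pos h

theorem runsSpec_nil (hljc : List (Int × Int)) (i : Nat) (h : ¬ i < hljc.length) :
    runsSpec hljc i = [] := by
  rw [runsSpec]
  exact dif_neg h

theorem runEndA_le (hljc : List (Int × Int)) (c : Int) (i : Nat) (h : i ≤ hljc.length) :
    runEndA hljc c i ≤ hljc.length := by
  fun_induction runEndA hljc c i with
  | case1 i h' hc ih => exact ih (by omega)
  | case2 i h' hc => omega
  | case3 i h' => omega

theorem cluster_eq_of_lt_runEndA (hljc : List (Int × Int)) (c : Int) (i k : Nat)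
    (hik : i ≤ k) (hk : k < runEndA hljc c i) (hkl : k < hljc.length) :
    (hljc[k]'hkl).1 = c := by
  fun_induction runEndA hljc c i with
  | case1 i h' hc ih =>
      rcases Nat.eq_or_lt_of_le hik with rfl | hlt
      · exact hc
      · exact ih (by omega) hk
  | case2 i h' hc => omega
  | case3 i h' => omega

theorem cluster_ne_at_runEndA (hljc : List (Int × Int)) (c : Int) (i : Nat)
    (h : runEndA hljc c i < hljc.length) :
    (hljc[runEndA hljc c i]'h).1 ≠ c := by
  fun_induction runEndA hljc c i with
  | case1 i h' hc ih => exact ih h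
  | case2 i h' hc => exact hc
  | case3 i h' => exact absurd h h'

-- the within-run march of B's fold: while the cluster repeats, the head run is extended
theorem stepRun_march (hljc : List (Int × Int)) (c s : Int) (i : Nat)
    (m : Nat) : ∀ (j : Nat) (rest : List (Int × Int × Int)),
    i ≤ j → j ≤ runEndA hljc c i → runEndA hljc c i ≤ hljc.length →
    runEndA hljc c i - j ≤ m →
    (PySem.List.enumerate (hljc.drop j) (j : Int)).foldl stepRun ((s, (j : Int), c) :: rest)
      = (PySem.List.enumerate (hljc.drop (runEndA hljc c i)) ((runEndA hljc c i : Nat) : Int)).foldl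
          stepRun ((s, ((runEndA hljc c i : Nat) : Int), c) :: rest) := by
  induction m with
  | zero =>
      intro j rest hij hje hel hm
      have : j = runEndA hljc c i := by omega
      subst this; rfl
  | succ m ih =>
      intro j rest hij hje hel hm
      rcases Nat.eq_or_lt_of_le hje with rfl | hlt
      · rfl
      · have hjl : j < hljc.length := by omega
        have hcl : (hljc[j]'hjl).1 = c := cluster_eq_of_lt_runEndA hljc c i j hij hlt hjl
        rw [List.drop_eq_getElem_cons hjl, PySem.List.enumerate_cons, List.foldl_cons]
        have hstep : stepRun ((s, (j : Int), c) :: rest) ((j : Int), hljc[j]'hjl)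
            = (s, ((j + 1 : Nat) : Int), c) :: rest := by
          simp [stepRun, hcl]
        rw [hstep]
        have := ih (j + 1) rest (by omega) (by omega) hel (by omega)
        simpa using this

-- B's fold computes runsSpec (reversed), given the accumulator head cannot merge
theorem foldl_stepRun_runsSpec (hljc : List (Int × Int)) (m : Nat) :
    ∀ (i : Nat) (acc : List (Int × Int × Int)),
    i ≤ hljc.length → hljc.length - i ≤ m →
    (∀ (h : i < hljc.length) p rest, acc = p :: rest → p.2.2 ≠ (hljc[i]'h).1) →
    (PySem.List.enumerate (hljc.drop i) (i : Int)).foldl stepRun acc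
      = (runsSpec hljc i).reverse ++ acc := by
  induction m with
  | zero =>
      intro i acc hin hm hacc
      have hi : i = hljc.length := by omega
      rw [runsSpec_nil hljc i (by omega), List.drop_eq_nil_of_le (by omega)]
      simp [PySem.List.enumerate]
  | succ m ih =>
      intro i acc hin hm hacc
      by_cases h : i < hljc.length
      · have hie : i < runEndA hljc (hljc[i]'h).1 i := runEndA_gt _ _ _ h rfl
        have hel : runEndA hljc (hljc[i]'h).1 i ≤ hljc.length := runEndA_le _ _ _ (by omega)
        rw [List.drop_eq_getElem_cons h, PySem.List.enumerate_cons, List.foldl_cons]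
        have hstep : stepRun acc ((i : Int), hljc[i]'h)
            = ((i : Int), (i : Int) + 1, (hljc[i]'h).1) :: acc := by
          match acc, hacc with
          | [], _ => rfl
          | (ps, pe, pc) :: rest, hacc =>
              have hne : pc ≠ (hljc[i]'h).1 := hacc h (ps, pe, pc) rest rfl
              simp [stepRun, hne]
        rw [hstep]
        rw [show (i : Int) + 1 = ((i + 1 : Nat) : Int) by push_cast; ring]
        have hmarch := stepRun_march hljc (hljc[i]'h).1 (i : Int) i
          (runEndA hljc (hljc[i]'h).1 i - (i + 1)) (i + 1) acc (by omega) (by omega) hel (by omega)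
        rw [hmarch]
        have hacc' : ∀ (h' : runEndA hljc (hljc[i]'h).1 i < hljc.length) p rest,
            (((i : Int), ((runEndA hljc (hljc[i]'h).1 i : Nat) : Int), (hljc[i]'h).1) :: acc)
              = p :: rest → p.2.2 ≠ (hljc[runEndA hljc (hljc[i]'h).1 i]'h').1 := by
          intro h' p rest hp
          cases hp
          exact fun hq => cluster_ne_at_runEndA hljc (hljc[i]'h).1 i h' hq.symm
        rw [ih _ _ hel (by omega) hacc']
        rw [runsSpec_pos hljc i h]
        simp
      · rw [runsSpec_nil hljc i h, List.drop_eq_nil_of_le (by omega)]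
        simp [PySem.List.enumerate]

theorem runsB_eq_runsSpec (hljc : List (Int × Int)) : runsB hljc = runsSpec hljc 0 := by
  unfold runsB
  have h0 : PySem.List.enumerate hljc 0 = PySem.List.enumerate (hljc.drop 0) ((0 : Nat) : Int) := by
    simp
  rw [h0, foldl_stepRun_runsSpec hljc hljc.length 0 [] (by omega) (by omega)
    (by intro h p rest hp; simp at hp)]
  simp

-- A's loop equals B's two-phase flatMap over runsSpec
theorem loopA_eq (hljc : List (Int × Int)) (minL maxL : Int) :
    ∀ (i : Nat) (segs : List (Int × Int × Int)),
    loopA hljc minL maxL i segs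
      = segs ++ (runsSpec hljc i).flatMap (fun r => chunksB r.1 r.2.1 r.2.2 minL maxL) := by
  intro i segs
  fun_induction loopA hljc minL maxL i segs with
  | case1 i segs h c e segs' ih =>
      have hsegs' : segs' = segs ++ chunksB (i : Int) ((e : Nat) : Int) c minL maxL := by
        simp only [segs', dite_eq_ite]
        unfold chunksB
        by_cases hlen : minL ≤ (e : Int) - (i : Int)
        · rw [if_pos hlen, if_neg (by omega)]
          rw [PySem.List.foldl_append_ite
            (fun j => minL ≤ min (j + maxL) (e : Int) - j)
            (fun j => (j, min (j + maxL) (e : Int), c)),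
            PySem.List.foldl_append_ite
            (fun j => minL ≤ min (j + maxL) (e : Int) - j)
            (fun j => (j, min (j + maxL) (e : Int), c))]
          simp
        · rw [if_neg hlen, if_pos (by omega), List.append_nil]
      rw [ih, hsegs', runsSpec_pos hljc i h]
      simp only [List.flatMap_cons, List.append_assoc]
      rfl
  | case2 i segs h =>
      rw [runsSpec_nil hljc i h]
      simp

-- ===== VERDICT (by name: the statement is the Claim_ definition above) =====
theorem find_consistent_segments_spec : Claim_equal_find_consistent_segments := by
  intro hljc minL maxL _ _
  unfold Spec_find_consistent_segments find_consistent_segments find_consistent_segments_alt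
  rw [loopA_eq, runsB_eq_runsSpec]
  rw [PySem.List.foldl_append_eq_flatMap]
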